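-- pv_equiv track=rewrite | github.com/hungan123/MyProject | main.py | screening2
-- ===== SOURCE A (Python) =====
-- def screening2(group):
--     min_value = min(group)
--     max_value = max(group)
--     product = 1
--     for num in group:
--         product *= num
--     if product % (max_value - min_value) != 0:
--         group.remove(min_value)
--         group.remove(max_value)
--     return group
-- ===== SOURCE B (Python) =====
-- def _gcd(a, b):
--     while b:
--         a, b = b, a % b
--     return a
--
--
-- def screening2(group):
--     mn = min(group)
--     mx = max(group)
--     d = mx - mn
--     for x in group:
--         if d == 1:
--             break
--         if x < 0:
--             x = -x
--         g = _gcd(d, x)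
--         while g > 1:
--             d //= g
--             x //= g
--             g = _gcd(d, x)
--     if d != 1:
--         group.remove(mn)
--         group.remove(mx)
--     return group
-- ===== Notes on version B (the rewrite author's own statement) =====
-- stated objective: faster
-- what changed: B never computes the product: it tests divisibility by d = max-min by letting each element strip its common factors out of d with a hand-rolled Euclidean gcd (d //= gcd, element //= gcd, repeated), removing min/max iff d is not reduced to 1; A builds the full big-integer product and takes it modulo d.
-- outside the precondition, e.g. on screening2([]): A raises ValueError, B raises ValueError; on screening2([5, 5]): A raises ZeroDivisionError, B returns []
import Mathlib
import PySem

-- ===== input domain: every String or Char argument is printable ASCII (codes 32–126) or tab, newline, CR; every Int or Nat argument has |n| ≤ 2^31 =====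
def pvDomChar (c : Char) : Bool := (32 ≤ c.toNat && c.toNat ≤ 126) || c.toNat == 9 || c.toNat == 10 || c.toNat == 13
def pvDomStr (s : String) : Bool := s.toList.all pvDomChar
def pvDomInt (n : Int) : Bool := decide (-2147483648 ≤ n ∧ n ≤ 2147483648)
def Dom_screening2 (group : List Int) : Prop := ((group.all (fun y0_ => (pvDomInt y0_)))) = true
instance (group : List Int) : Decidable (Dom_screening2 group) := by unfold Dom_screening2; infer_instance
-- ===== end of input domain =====

-- B: replaces A's big-integer product with a gcd-peeling divisibility test (each element strips
-- its common factors out of d = max-min), so only word-sized numbers are handled; objective: faster.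
-- A (and B) mutate `group` in place via remove; the equivalence proved here is about the RETURN value only.


-- ===== PORT A =====
def screening2 (group : List Int) : List Int :=
  match PySem.List.min? group (fun x => x), PySem.List.max? group (fun x => x) with
  | some min_value, some max_value =>
      if PySem.Int.mod (group.foldl (fun p num => p * num) 1) (max_value - min_value) ≠ 0 then
        let g1 := (PySem.List.remove? group min_value).getD group
        (PySem.List.remove? g1 max_value).getD g1
      else group
  | _, _ => group   -- Python: min([]) raises ValueError (outside Pre_)

-- ===== PORT B =====
-- _gcd(a, b): Euclid by hand, as in Source B (the Nat fuel only makes the recursion structural;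
-- fuel |b|+1 is enough since |a % b| < |b| each step)
def pyGcdF (n : Nat) (a b : Int) : Int :=
  match n with
  | 0 => a
  | n+1 => if b = 0 then a else pyGcdF n b (PySem.Int.mod a b)

def pyGcd (a b : Int) : Int := pyGcdF (b.natAbs + 1) a b

-- inner `while g > 1` loop of Source B (the Nat fuel only makes the recursion structural;
-- fuel |d|+|x|+1 is enough since |d|+|x| strictly decreases each iteration)
def peelLoopF (n : Nat) (d x : Int) : Int :=
  match n with
  | 0 => d
  | n+1 =>
      let g := pyGcd d x
      if 1 < g then peelLoopF n (PySem.Int.floordiv d g) (PySem.Int.floordiv x g) else d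

def peelLoop (d x : Int) : Int := peelLoopF (d.natAbs + x.natAbs + 1) d x

def peelFold (d : Int) (l : List Int) : Int :=
  match l with
  | [] => d
  | x :: rest =>
      if d = 1 then d
      else peelFold (peelLoop d (if x < 0 then -x else x)) rest

def screening2_alt (group : List Int) : List Int :=
  match PySem.List.min? group (fun x => x) with
  | none => group   -- Python: min([]) raises ValueError (outside Pre_)
  | some mn =>
      match PySem.List.max? group (fun x => x) with
      | none => group
      | some mx =>
          if peelFold (mx - mn) group ≠ 1 then
            let g1 := (PySem.List.remove? group mn).getD group
            (PySem.List.remove? g1 mx).getD g1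
          else group

-- ===== PRECONDITION & SPEC =====
-- Pre_ excludes exactly the inputs on which A raises: the empty list (min([]) → ValueError) and
-- constant lists (max-min = 0 → ZeroDivisionError in A's `product % 0`).
def Pre_screening2 (group : List Int) : Prop := ∃ x ∈ group, x ≠ group.headD 0
instance (group : List Int) : Decidable (Pre_screening2 group) := by unfold Pre_screening2; infer_instance
def pvWitness_screening2 : List Int := [3, 1, 4]

def Spec_screening2 (group : List Int) (out : List Int) : Prop := out = screening2_alt group
instance (group : List Int) (out : List Int) : Decidable (Spec_screening2 group out) := by unfold Spec_screening2; infer_instance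

-- ===== CLAIM (what is proved, stated in full; the proofs are below) =====
def Claim_equal_screening2 : Prop := ∀ (group : List Int), Dom_screening2 group → Pre_screening2 group → Spec_screening2 group (screening2 group)

-- ===== LEMMAS AND PROOFS =====

theorem pyGcd_eq_gcd_fuel : ∀ (n : Nat) (a b : Int), b.natAbs < n → 0 ≤ a → 0 ≤ b →
    pyGcdF n a b = (Int.gcd a b : Int) := by
  intro n
  induction n with
  | zero => intro a b hn _ _; omega
  | succ n ih =>
      intro a b hn ha hb
      show (if b = 0 then a else pyGcdF n b (PySem.Int.mod a b)) = _
      split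
      · rename_i hb0
        subst hb0
        simp [Int.natAbs_of_nonneg ha]
      · rename_i hb0
        have hbpos : (0:Int) < b := lt_of_le_of_ne hb (Ne.symm hb0)
        rw [PySem.Int.mod_eq_emod_of_pos hbpos]
        have hlt : (a % b).natAbs < b.natAbs := by
          have h1 := Int.emod_nonneg a (by omega : b ≠ 0)
          have h2 := Int.emod_lt_of_pos a hbpos
          omega
        rw [ih b (a % b) (by omega) hb (Int.emod_nonneg a (by omega))]
        congr 1
        simp [Int.emod_def, Int.gcd_comm]

theorem pyGcd_eq_gcd (a b : Int) (ha : 0 ≤ a) (hb : 0 ≤ b) :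
    pyGcd a b = (Int.gcd a b : Int) :=
  pyGcd_eq_gcd_fuel (b.natAbs + 1) a b (Nat.lt_succ_self _) ha hb

-- common facts inside the recursive branch of the peel loop
theorem peel_facts (d x : Int) (hd : 0 < d) (hx : 0 ≤ x) (hg : 1 < pyGcd d x) :
    pyGcd d x ∣ d ∧ pyGcd d x ∣ x ∧
    PySem.Int.floordiv d (pyGcd d x) = d / pyGcd d x ∧
    PySem.Int.floordiv x (pyGcd d x) = x / pyGcd d x ∧
    d = pyGcd d x * (d / pyGcd d x) ∧ x = pyGcd d x * (x / pyGcd d x) ∧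
    0 < d / pyGcd d x ∧ 0 ≤ x / pyGcd d x ∧
    (d / pyGcd d x).natAbs + (x / pyGcd d x).natAbs < d.natAbs + x.natAbs := by
  have hge : pyGcd d x = (Int.gcd d x : Int) := pyGcd_eq_gcd d x hd.le hx
  have h1 : pyGcd d x ∣ d := by rw [hge]; exact Int.gcd_dvd_left d x
  have h2 : pyGcd d x ∣ x := by rw [hge]; exact Int.gcd_dvd_right d x
  have hg0 : (0:Int) < pyGcd d x := by omega
  have e1 := PySem.Int.floordiv_eq_ediv_of_pos (a := d) hg0
  have e2 := PySem.Int.floordiv_eq_ediv_of_pos (a := x) hg0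
  have m1 : pyGcd d x * (d / pyGcd d x) = d := Int.mul_ediv_cancel' h1
  have m2 : pyGcd d x * (x / pyGcd d x) = x := Int.mul_ediv_cancel' h2
  have p1 : 0 < d / pyGcd d x := by nlinarith [m1]
  have p2 : 0 ≤ x / pyGcd d x := Int.ediv_nonneg hx hg0.le
  refine ⟨h1, h2, e1, e2, m1.symm, m2.symm, p1, p2, ?_⟩
  rcases eq_or_lt_of_le hx with hx0 | hx0
  · -- x = 0: g = pyGcd d 0 = d > 1 and d / d = 1 < d
    have hgd : pyGcd d x = d := by rw [← hx0]; rfl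
    have hdd : d / pyGcd d x = 1 := by rw [hgd]; exact Int.ediv_self (by omega)
    have hxx : x / pyGcd d x = 0 := by rw [← hx0]; simp
    rw [hdd, hxx]
    rw [hgd] at hg
    simp
    omega
  · have hlt : x / pyGcd d x < x := by
      rw [Int.ediv_lt_iff_lt_mul hg0]; nlinarith
    have hle : d / pyGcd d x ≤ d := Int.ediv_le_self _ hd.le
    omega

-- one unfolding of the peel loop, at the canonical fuel
theorem peelLoopF_irrel : ∀ (n m : Nat) (d x : Int), 0 < d → 0 ≤ x →
    d.natAbs + x.natAbs < n → d.natAbs + x.natAbs < m →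
    peelLoopF n d x = peelLoopF m d x := by
  intro n
  induction n with
  | zero => intro m d x _ _ hn _; omega
  | succ n ih =>
      intro m d x hd hx hn hm
      cases m with
      | zero => omega
      | succ m =>
          show (if 1 < pyGcd d x then peelLoopF n _ _ else d)
              = (if 1 < pyGcd d x then peelLoopF m _ _ else d)
          split
          · rename_i hg
            obtain ⟨_, _, e1, e2, _, _, p1, p2, hmeas⟩ := peel_facts d x hd hx hg
            rw [e1, e2]
            exact ih m _ _ p1 p2 (by omega) (by omega)
          · rfl

theorem peelLoop_step (d x : Int) (hd : 0 < d) (hx : 0 ≤ x) (hg : 1 < pyGcd d x) :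
    peelLoop d x
      = peelLoop (PySem.Int.floordiv d (pyGcd d x)) (PySem.Int.floordiv x (pyGcd d x)) := by
  obtain ⟨_, _, e1, e2, _, _, p1, p2, hmeas⟩ := peel_facts d x hd hx hg
  show (if 1 < pyGcd d x then peelLoopF (d.natAbs + x.natAbs) _ _ else d) = _
  rw [if_pos hg]
  unfold peelLoop
  rw [e1, e2]
  exact peelLoopF_irrel _ _ _ _ p1 p2 (by omega) (by omega)

theorem peelLoop_base (d x : Int) (hg : ¬ 1 < pyGcd d x) : peelLoop d x = d := by
  show (if 1 < pyGcd d x then peelLoopF (d.natAbs + x.natAbs) _ _ else d) = d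
  rw [if_neg hg]

theorem peelLoop_pos_fuel : ∀ (k : Nat) (d x : Int), d.natAbs + x.natAbs ≤ k →
    0 < d → 0 ≤ x → 0 < peelLoop d x := by
  intro k
  induction k using Nat.strong_induction_on with
  | _ k ih =>
      intro d x hk hd hx
      by_cases hg : 1 < pyGcd d x
      · obtain ⟨_, _, e1, e2, _, _, p1, p2, hmeas⟩ := peel_facts d x hd hx hg
        rw [peelLoop_step d x hd hx hg, e1, e2]
        exact ih ((d / pyGcd d x).natAbs + (x / pyGcd d x).natAbs) (by omega) _ _ le_rfl p1 p2
      · rw [peelLoop_base d x hg]; exact hd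

theorem peelLoop_pos (d x : Int) (hd : 0 < d) (hx : 0 ≤ x) : 0 < peelLoop d x :=
  peelLoop_pos_fuel (d.natAbs + x.natAbs) d x le_rfl hd hx

-- L1: d divides x times the peeled remainder
theorem dvd_mul_peelLoop_fuel : ∀ (k : Nat) (d x : Int), d.natAbs + x.natAbs ≤ k →
    0 < d → 0 ≤ x → d ∣ x * peelLoop d x := by
  intro k
  induction k using Nat.strong_induction_on with
  | _ k ih =>
      intro d x hk hd hx
      by_cases hg : 1 < pyGcd d x
      · obtain ⟨_, _, e1, e2, m1, m2, p1, p2, hmeas⟩ := peel_facts d x hd hx hg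
        rw [peelLoop_step d x hd hx hg, e1, e2]
        have hrec := ih ((d / pyGcd d x).natAbs + (x / pyGcd d x).natAbs) (by omega) _ _ le_rfl p1 p2
        calc d = pyGcd d x * (d / pyGcd d x) := m1
          _ ∣ pyGcd d x * (x / pyGcd d x * peelLoop (d / pyGcd d x) (x / pyGcd d x)) :=
              mul_dvd_mul_left _ hrec
          _ = x * peelLoop (d / pyGcd d x) (x / pyGcd d x) := by rw [← mul_assoc, ← m2]
      · rw [peelLoop_base d x hg]; exact dvd_mul_left d x

theorem dvd_mul_peelLoop (d x : Int) (hd : 0 < d) (hx : 0 ≤ x) : d ∣ x * peelLoop d x :=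
  dvd_mul_peelLoop_fuel (d.natAbs + x.natAbs) d x le_rfl hd hx

-- L2: if d divides x*m, the peeled remainder divides m
theorem peelLoop_dvd_fuel : ∀ (k : Nat) (d x m : Int), d.natAbs + x.natAbs ≤ k →
    0 < d → 0 ≤ x → d ∣ x * m → peelLoop d x ∣ m := by
  intro k
  induction k using Nat.strong_induction_on with
  | _ k ih =>
      intro d x m hk hd hx hdvd
      by_cases hg : 1 < pyGcd d x
      · obtain ⟨_, _, e1, e2, m1, m2, p1, p2, hmeas⟩ := peel_facts d x hd hx hg
        rw [peelLoop_step d x hd hx hg, e1, e2]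
        apply ih ((d / pyGcd d x).natAbs + (x / pyGcd d x).natAbs) (by omega) _ _ m le_rfl p1 p2
        have hne : pyGcd d x ≠ 0 := by omega
        rw [← mul_dvd_mul_iff_left (b := d / pyGcd d x) (c := x / pyGcd d x * m) hne]
        rw [← mul_assoc, ← m2, ← m1]
        exact hdvd
      · rw [peelLoop_base d x hg]
        have hge : pyGcd d x = (Int.gcd d x : Int) := pyGcd_eq_gcd d x hd.le hx
        have hgpos : 0 < Int.gcd d x := Int.gcd_pos_iff.mpr (Or.inl (by omega))
        have hg1 : Int.gcd d x = 1 := by rw [hge] at hg; omega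
        have hcop : IsCoprime d x := Int.isCoprime_iff_gcd_eq_one.mpr hg1
        exact hcop.dvd_of_dvd_mul_left hdvd

theorem peelLoop_dvd (d x m : Int) (hd : 0 < d) (hx : 0 ≤ x) (h : d ∣ x * m) :
    peelLoop d x ∣ m :=
  peelLoop_dvd_fuel (d.natAbs + x.natAbs) d x m le_rfl hd hx h

-- the fold reaches 1 exactly when d divides the product of absolute values
theorem peelFold_eq_one_iff : ∀ (l : List Int) (d : Int), 0 < d →
    (peelFold d l = 1 ↔ d ∣ (l.map (fun x => |x|)).prod) := by
  intro l
  induction l with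
  | nil =>
      intro d hd
      simp only [peelFold, List.map_nil, List.prod_nil]
      constructor
      · intro h; simp [h]
      · intro h; have := Int.le_of_dvd one_pos h; omega
  | cons x t ih =>
      intro d hd
      by_cases hd1 : d = 1
      · simp [peelFold, hd1]
      · have habs : (if x < 0 then -x else x) = |x| := by
          rcases lt_or_ge x 0 with h | h
          · rw [if_pos h, abs_of_neg h]
          · rw [if_neg (not_lt.mpr h), abs_of_nonneg h]
        have hx : (0:Int) ≤ if x < 0 then -x else x := by rw [habs]; exact abs_nonneg x
        have hp := peelLoop_pos d (if x < 0 then -x else x) hd hx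
        rw [peelFold, if_neg hd1, ih _ hp]
        simp only [List.map_cons, List.prod_cons]
        constructor
        · intro hdvd
          have h1 := dvd_mul_peelLoop d (if x < 0 then -x else x) hd hx
          calc d ∣ (if x < 0 then -x else x) * peelLoop d (if x < 0 then -x else x) := h1
            _ ∣ (if x < 0 then -x else x) * (t.map (fun x => |x|)).prod :=
                mul_dvd_mul_left _ hdvd
            _ = |x| * (t.map (fun x => |x|)).prod := by rw [habs]
        · intro hdvd
          apply peelLoop_dvd d (if x < 0 then -x else x) _ hd hx
          rw [habs]
          exact hdvd

theorem abs_list_prod (l : List Int) : |l.prod| = (l.map (fun x => |x|)).prod := by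
  induction l with
  | nil => simp
  | cons x t ih => simp [abs_mul, ih]

theorem screening2_spec : Claim_equal_screening2 := by
  intro group _ hpre
  obtain ⟨x, hxmem, hxne⟩ := hpre
  unfold Spec_screening2 screening2 screening2_alt
  cases group with
  | nil => cases hxmem
  | cons g0 gs =>
    simp only [List.headD_cons] at hxne
    rw [PySem.List.min?_id_cons, PySem.List.max?_id_cons]
    set mn := gs.foldl min g0 with hmn
    set mx := gs.foldl max g0 with hmx
    have hx_gs : x ∈ gs := by cases hxmem with
      | head => exact absurd rfl hxne
      | tail _ h => exact h
    have h1 := PySem.List.foldl_min_le gs g0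
    have h2 := PySem.List.le_foldl_max gs g0
    have hlt : mn < mx := by
      rcases lt_or_gt_of_ne hxne with h | h
      · exact lt_of_le_of_lt (h1.2 x hx_gs) (lt_of_lt_of_le h h2.1)
      · exact lt_of_le_of_lt h1.1 (lt_of_lt_of_le h (h2.2 x hx_gs))
    have hdpos : (0:Int) < mx - mn := by omega
    have hA : (PySem.Int.mod ((g0 :: gs).foldl (fun p num => p * num) 1) (mx - mn) ≠ 0)
        ↔ ¬ ((mx - mn) ∣ (g0 :: gs).foldl (fun p num => p * num) 1) :=
      not_iff_not.mpr (PySem.Int.mod_eq_zero_iff_dvd _ _)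
    have hB : (peelFold (mx - mn) (g0 :: gs) ≠ 1)
        ↔ ¬ ((mx - mn) ∣ (g0 :: gs).foldl (fun p num => p * num) 1) := by
      apply not_iff_not.mpr
      rw [peelFold_eq_one_iff _ _ hdpos, ← abs_list_prod, dvd_abs,
        List.prod_eq_foldl]
    exact if_congr (hA.trans hB.symm) rfl rfl
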